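-- pv_equiv track=rewrite | github.com/DominikDitoIvosevic/AibgV3 | gamePlay3.py | parseBoard
-- ===== SOURCE A (Python) =====
-- def parseBoard(boardSize, boardTiles):
--
--     # dakle kada napunimo prvu listu, onda appendamo na ukupnu listu
--     # tip klase koja... kaze kakvo je polje..
--     # meh pa na kraju samo konveratemo u matricu...
--
--     fields = []
--
--     cnt = 0
--
--     while (cnt < len(boardTiles)):
--
--         if boardTiles[cnt:cnt+2] == '  ':
--             fields.append('Prazno')
--         if boardTiles[cnt:cnt+2] == '##':
--             fields.append('Prepreka')
--         elif boardTiles[cnt:cnt+2] == '@1':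
--             fields.append('Heroj1')
--         elif boardTiles[cnt:cnt+2] == '@2':
--             fields.append('Heroj2')
--         elif boardTiles[cnt:cnt+2] == '[]':
--             fields.append('AparatZaKavu')
--         elif boardTiles[cnt:cnt+2] == '$-':
--             fields.append('RudnikNeutralan')
--         elif boardTiles[cnt:cnt+2] == '$1':
--             fields.append('Rudnik1')
--         elif boardTiles[cnt:cnt+2] == '$2':
--             fields.append('Rudnik2')
--
--         cnt += 2
--
--
--     lenOfFields = len(fields)
--     rows = lenOfFields//boardSize
--     finalBoard = []
--
--    # print (lenOfFields, boardSize)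
--
--     currStart = 0
--     for i in range(0, rows):
--         finalBoard.append(fields[currStart: currStart + boardSize])
--         currStart += boardSize
--
--
--     return finalBoard
-- ===== SOURCE B (Python) =====
-- LABELS = {'  ': 'Prazno', '##': 'Prepreka', '@1': 'Heroj1', '@2': 'Heroj2',
--           '[]': 'AparatZaKavu', '$-': 'RudnikNeutralan', '$1': 'Rudnik1', '$2': 'Rudnik2'}
--
--
-- def parseBoard(boardSize, boardTiles):
--     finalBoard = []
--     row = []
--     for i in range(0, len(boardTiles), 2):
--         label = LABELS.get(boardTiles[i:i+2])
--         if label is not None: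
--             row.append(label)
--             if len(row) == boardSize:
--                 finalBoard.append(row)
--                 row = []
--     return finalBoard
-- ===== Notes on version B (the rewrite author's own statement) =====
-- stated objective: simpler
-- what changed: B fuses A's two passes (an if/elif chain of up to 9 string comparisons per chunk building a flat field list, then a separate rows = len//boardSize slicing loop) into one pass with a single dict lookup per chunk and an incremental row buffer flushed at boardSize; Pre_ excludes only boardSize = 0, where A raises ZeroDivisionError.
-- outside the precondition, e.g. on parseBoard(0, '##'): A raises ZeroDivisionError, B returns []
import Mathlib
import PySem

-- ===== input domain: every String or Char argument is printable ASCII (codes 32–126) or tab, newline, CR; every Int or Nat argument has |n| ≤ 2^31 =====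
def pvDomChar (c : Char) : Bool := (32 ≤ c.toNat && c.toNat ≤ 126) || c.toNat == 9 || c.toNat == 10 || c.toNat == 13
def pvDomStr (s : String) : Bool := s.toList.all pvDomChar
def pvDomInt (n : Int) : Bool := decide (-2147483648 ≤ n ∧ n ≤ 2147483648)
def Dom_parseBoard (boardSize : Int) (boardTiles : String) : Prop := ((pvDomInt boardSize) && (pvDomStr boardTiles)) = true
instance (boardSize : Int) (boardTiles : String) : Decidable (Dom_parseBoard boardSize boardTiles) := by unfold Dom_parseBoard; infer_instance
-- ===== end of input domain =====

-- B fuses A's two passes (build a flat list of field labels, then slice it into rows) into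
-- one pass: a dict lookup per 2-char chunk instead of an if/elif chain, pushing onto a row
-- buffer flushed at boardSize; simpler, same O(n), measurably faster by constant factor.

-- ===== PORT A =====
-- while loop building `fields`: chunk = boardTiles[cnt:cnt+2], separate `if '  '` then if/elif chain
def pvFieldsA (s : List Char) (cnt : Nat) (acc : List String) : List String :=
  if cnt < s.length then
    let chunk := PySem.List.slice s (some (cnt : Int)) (some ((cnt : Int) + 2))
    let acc1 := if chunk = [' ', ' '] then acc ++ ["Prazno"] else acc
    let acc2 :=
      if chunk = ['#', '#'] then acc1 ++ ["Prepreka"]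
      else if chunk = ['@', '1'] then acc1 ++ ["Heroj1"]
      else if chunk = ['@', '2'] then acc1 ++ ["Heroj2"]
      else if chunk = ['[', ']'] then acc1 ++ ["AparatZaKavu"]
      else if chunk = ['$', '-'] then acc1 ++ ["RudnikNeutralan"]
      else if chunk = ['$', '1'] then acc1 ++ ["Rudnik1"]
      else if chunk = ['$', '2'] then acc1 ++ ["Rudnik2"]
      else acc1
    pvFieldsA s (cnt + 2) acc2
  else acc
termination_by s.length - cnt

def parseBoard (boardSize : Int) (boardTiles : String) : List (List String) :=
  let fields := pvFieldsA boardTiles.toList 0 []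
  let lenOfFields : Int := fields.length
  let rows := PySem.Int.floordiv lenOfFields boardSize
  -- for i in range(0, rows): append fields[currStart : currStart + boardSize]; currStart += boardSize
  let st := (PySem.List.pyRange 0 rows 1).foldl
    (fun (st : List (List String) × Int) _i =>
      (st.1 ++ [PySem.List.slice fields (some st.2) (some (st.2 + boardSize))], st.2 + boardSize))
    ([], 0)
  st.1

-- ===== PORT B =====
-- LABELS dict (chunk -> label); keys kept on the List Char side of strings
def pvLABELS : PySem.Dict (List Char) String :=
  PySem.Dict.ofList
    [([' ', ' '], "Prazno"), (['#', '#'], "Prepreka"), (['@', '1'], "Heroj1"),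
     (['@', '2'], "Heroj2"), (['[', ']'], "AparatZaKavu"), (['$', '-'], "RudnikNeutralan"),
     (['$', '1'], "Rudnik1"), (['$', '2'], "Rudnik2")]

-- single pass: for i in range(0, len(boardTiles), 2): look chunk up, push onto row, flush at boardSize
def parseBoard_alt (boardSize : Int) (boardTiles : String) : List (List String) :=
  let s := boardTiles.toList
  let st := (PySem.List.pyRange 0 (s.length : Int) 2).foldl
    (fun (st : List (List String) × List String) i =>
      match pvLABELS.get? (PySem.List.slice s (some i) (some (i + 2))) with
      | none => st
      | some label =>
        let row := st.2 ++ [label]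
        if (row.length : Int) = boardSize then (st.1 ++ [row], []) else (st.1, row))
    ([], [])
  st.1

-- ===== PRECONDITION & SPEC =====
-- Pre_ excludes only boardSize = 0, where A raises ZeroDivisionError on `len(fields)//boardSize`.
def Pre_parseBoard (boardSize : Int) (boardTiles : String) : Prop := boardSize ≠ 0
instance (boardSize : Int) (boardTiles : String) : Decidable (Pre_parseBoard boardSize boardTiles) := by unfold Pre_parseBoard; infer_instance

def pvWitness_parseBoard : Int × String := (2, "##@1$-[]")

def Spec_parseBoard (boardSize : Int) (boardTiles : String) (out : List (List String)) : Prop := out = parseBoard_alt boardSize boardTiles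
instance (boardSize : Int) (boardTiles : String) (out : List (List String)) : Decidable (Spec_parseBoard boardSize boardTiles out) := by unfold Spec_parseBoard; infer_instance

-- ===== CLAIM (what is proved, stated in full; the proofs are below) =====
def Claim_equal_parseBoard : Prop := ∀ (boardSize : Int) (boardTiles : String), Dom_parseBoard boardSize boardTiles → Pre_parseBoard boardSize boardTiles → Spec_parseBoard boardSize boardTiles (parseBoard boardSize boardTiles)

-- ===== LEMMAS AND PROOFS =====

-- the label a 2-char chunk maps to (spec used to connect both ports)
def pvOptLabel? (c : List Char) : Option String :=
  if c = [' ', ' '] then some "Prazno"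
  else if c = ['#', '#'] then some "Prepreka"
  else if c = ['@', '1'] then some "Heroj1"
  else if c = ['@', '2'] then some "Heroj2"
  else if c = ['[', ']'] then some "AparatZaKavu"
  else if c = ['$', '-'] then some "RudnikNeutralan"
  else if c = ['$', '1'] then some "Rudnik1"
  else if c = ['$', '2'] then some "Rudnik2"
  else none

def pvOptLabel (c : List Char) : List String := (pvOptLabel? c).elim [] (fun l => [l])

-- the stream of labels A's while loop collects, from index cnt on
def pvLabels (s : List Char) (cnt : Nat) : List String :=
  if cnt < s.length then
    pvOptLabel (PySem.List.slice s (some (cnt : Int)) (some ((cnt : Int) + 2))) ++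
      pvLabels s (cnt + 2)
  else []
termination_by s.length - cnt

theorem pvLABELS_get?_eq (c : List Char) : pvLABELS.get? c = pvOptLabel? c := by
  by_cases h0 : c = [' ', ' ']
  · subst h0; decide
  by_cases h1 : c = ['#', '#']
  · subst h1; decide
  by_cases h2 : c = ['@', '1']
  · subst h2; decide
  by_cases h3 : c = ['@', '2']
  · subst h3; decide
  by_cases h4 : c = ['[', ']']
  · subst h4; decide
  by_cases h5 : c = ['$', '-']
  · subst h5; decide
  by_cases h6 : c = ['$', '1']
  · subst h6; decide
  by_cases h7 : c = ['$', '2']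
  · subst h7; decide
  unfold pvOptLabel?
  simp only [if_neg h0, if_neg h1, if_neg h2, if_neg h3, if_neg h4, if_neg h5, if_neg h6, if_neg h7]
  have hitems : pvLABELS.items = [([' ', ' '], "Prazno"), (['#', '#'], "Prepreka"), (['@', '1'], "Heroj1"), (['@', '2'], "Heroj2"), (['[', ']'], "AparatZaKavu"), (['$', '-'], "RudnikNeutralan"), (['$', '1'], "Rudnik1"), (['$', '2'], "Rudnik2")] := by decide
  have e0 : ([' ', ' '] == c) = false := beq_eq_false_iff_ne.mpr (fun e => h0 e.symm)
  have e1 : (['#', '#'] == c) = false := beq_eq_false_iff_ne.mpr (fun e => h1 e.symm)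
  have e2 : (['@', '1'] == c) = false := beq_eq_false_iff_ne.mpr (fun e => h2 e.symm)
  have e3 : (['@', '2'] == c) = false := beq_eq_false_iff_ne.mpr (fun e => h3 e.symm)
  have e4 : (['[', ']'] == c) = false := beq_eq_false_iff_ne.mpr (fun e => h4 e.symm)
  have e5 : (['$', '-'] == c) = false := beq_eq_false_iff_ne.mpr (fun e => h5 e.symm)
  have e6 : (['$', '1'] == c) = false := beq_eq_false_iff_ne.mpr (fun e => h6 e.symm)
  have e7 : (['$', '2'] == c) = false := beq_eq_false_iff_ne.mpr (fun e => h7 e.symm)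
  simp [PySem.Dict.get?, hitems, List.find?, e0, e1, e2, e3, e4, e5, e6, e7]

theorem pvFieldsA_eq (s : List Char) (cnt : Nat) (acc : List String) :
    pvFieldsA s cnt acc = acc ++ pvLabels s cnt := by
  unfold pvFieldsA pvLabels
  split
  · rw [pvFieldsA_eq]
    generalize PySem.List.slice s (some (cnt : Int)) (some ((cnt : Int) + 2)) = c
    unfold pvOptLabel pvOptLabel?
    split_ifs <;> simp_all
  · simp
termination_by s.length - cnt

-- step-2 range induction forms
theorem pvRange_two_nil (a b : Int) (h : b ≤ a) : PySem.List.pyRange a b 2 = [] := by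
  rw [PySem.List.pyRange_of_pos a b (by norm_num)]
  simp [not_lt.mpr h]

theorem pvRange_two_cons (a b : Int) (h : a < b) :
    PySem.List.pyRange a b 2 = a :: PySem.List.pyRange (a + 2) b 2 := by
  rw [PySem.List.pyRange_of_pos a b (by norm_num),
      PySem.List.pyRange_of_pos (a + 2) b (by norm_num)]
  by_cases h2 : a + 2 < b
  · have hc : ((b - a + 2 - 1) / 2).toNat = ((b - (a + 2) + 2 - 1) / 2).toNat + 1 := by omega
    simp only [if_pos h, if_pos h2, hc, List.range_succ_eq_map]
    simp [List.map_map, Function.comp_def]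
    intro k _
    ring
  · have hc : ((b - a + 2 - 1) / 2).toNat = 1 := by omega
    simp [if_pos h, if_neg h2, hc]

-- B's per-row step on a label
def pvStepB (size : Int) (st : List (List String) × List String) (label : String) :
    List (List String) × List String :=
  let row := st.2 ++ [label]
  if (row.length : Int) = size then (st.1 ++ [row], []) else (st.1, row)

-- B's index fold equals the fold of pvStepB over the label stream
theorem pvAltFold_eq (size : Int) (s : List Char) (cnt : Nat)
    (st : List (List String) × List String) :
    (PySem.List.pyRange (cnt : Int) (s.length : Int) 2).foldl
      (fun st i =>
        match pvLABELS.get? (PySem.List.slice s (some i) (some (i + 2))) with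
        | none => st
        | some label =>
          let row := st.2 ++ [label]
          if (row.length : Int) = size then (st.1 ++ [row], []) else (st.1, row)) st
      = (pvLabels s cnt).foldl (pvStepB size) st := by
  by_cases h : cnt < s.length
  · rw [pvRange_two_cons _ _ (by exact_mod_cast h)]
    unfold pvLabels
    rw [if_pos h]
    have : ((cnt : Int) + 2) = ((cnt + 2 : Nat) : Int) := by push_cast; ring
    rw [List.foldl_cons, this, pvAltFold_eq, List.foldl_append]
    congr 1
    rw [pvLABELS_get?_eq]
    cases hl : pvOptLabel? (PySem.List.slice s (some (cnt : Int)) (some ((cnt : Int) + 2))) <;>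
      simp [pvOptLabel, hl, pvStepB]
  · rw [pvRange_two_nil _ _ (by exact_mod_cast not_lt.mp h)]
    unfold pvLabels
    rw [if_neg h]
    rfl
termination_by s.length - cnt

-- grouping a list into consecutive chunks of k, dropping the incomplete tail
def pvChunks (k : Nat) (F : List String) : List (List String) :=
  if _h : 0 < k ∧ k ≤ F.length then pvChunks k (F.drop k) |>.cons (F.take k) else []
termination_by F.length
decreasing_by
  have := _h.1; have := _h.2
  simp [List.length_drop]; omega

-- B's fold over the labels produces exactly the complete chunks (positive size)
theorem pvStepB_full (size : Int) (st : List (List String) × List String) (label : String)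
    (h : ((st.2 ++ [label]).length : Int) = size) :
    pvStepB size st label = (st.1 ++ [st.2 ++ [label]], []) := by
  simp only [pvStepB]
  rw [if_pos h]

theorem pvStepB_part (size : Int) (st : List (List String) × List String) (label : String)
    (h : ¬ ((st.2 ++ [label]).length : Int) = size) :
    pvStepB size st label = (st.1, st.2 ++ [label]) := by
  simp only [pvStepB]
  rw [if_neg h]

theorem pvFoldB_pos (size : Int) (hs : 0 < size) (F : List String)
    (done : List (List String)) (buf : List String) (hb : buf.length < size.toNat) :
    (F.foldl (pvStepB size) (done, buf)).1 = done ++ pvChunks size.toNat (buf ++ F) := by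
  induction F generalizing done buf with
  | nil =>
    have hc : ¬ (0 < size.toNat ∧ size.toNat ≤ (buf ++ ([] : List String)).length) := by
      rintro ⟨h1, h2⟩
      simp only [List.length_append, List.length_nil] at h2
      omega
    rw [pvChunks, dif_neg hc]
    simp
  | cons a F ih =>
    rw [List.foldl_cons]
    by_cases hfull : ((buf ++ [a]).length : Int) = size
    · rw [pvStepB_full size (done, buf) a hfull]
      rw [ih (done ++ [buf ++ [a]]) [] (by simp; omega)]
      have hk : size.toNat = (buf ++ [a]).length := by
        simp only [List.length_append, List.length_cons, List.length_nil] at hfull ⊢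
        omega
      have hcond : 0 < size.toNat ∧ size.toNat ≤ (buf ++ a :: F).length := by
        simp only [List.length_append, List.length_cons, List.length_nil] at hk ⊢
        omega
      have hsplit : buf ++ a :: F = (buf ++ [a]) ++ F := by simp
      have h1 : (buf ++ a :: F).take size.toNat = buf ++ [a] := by
        rw [hk, hsplit, List.take_left]
      have h2 : (buf ++ a :: F).drop size.toNat = F := by
        rw [hk, hsplit, List.drop_left]
      simp only [List.nil_append]
      conv_rhs => rw [pvChunks]
      rw [dif_pos hcond, h1, h2]
      simp
    · rw [pvStepB_part size (done, buf) a hfull]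
      have hlen : (buf ++ [a]).length < size.toNat := by
        simp only [List.length_append, List.length_cons, List.length_nil] at hfull ⊢
        omega
      rw [ih done (buf ++ [a]) hlen]
      congr 1
      simp

-- with negative size B never flushes a row
theorem pvFoldB_neg (size : Int) (hs : size < 0) (F : List String)
    (done : List (List String)) (buf : List String) :
    (F.foldl (pvStepB size) (done, buf)).1 = done := by
  induction F generalizing buf with
  | nil => rfl
  | cons a F ih =>
    rw [List.foldl_cons]
    unfold pvStepB
    have : ¬ (((buf ++ [a]).length : Int) = size) := by
      have : (0 : Int) ≤ ((buf ++ [a]).length : Int) := by positivity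
      omega
    simp only [if_neg this]
    exact ih _

-- a fold whose body ignores the list elements is an iteration
theorem pvFoldl_const {α β : Type} (g : β → β) (l : List α) (st : β) :
    l.foldl (fun st _ => g st) st = g^[l.length] st := by
  induction l generalizing st with
  | nil => rfl
  | cons a l ih => rw [List.foldl_cons, ih, List.length_cons, Function.iterate_succ_apply]

-- A's slicing loop, run r times from offset c, yields the chunks of the suffix
theorem pvIterA (size : Int) (hs : 0 < size) (F : List String) :
    ∀ (r : Nat) (done : List (List String)) (c : Int), 0 ≤ c →
    r = (F.drop c.toNat).length / size.toNat →
    ((fun (st : List (List String) × Int) =>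
        (st.1 ++ [PySem.List.slice F (some st.2) (some (st.2 + size))], st.2 + size))^[r]
      (done, c)).1 = done ++ pvChunks size.toNat (F.drop c.toNat) := by
  intro r
  induction r with
  | zero =>
    intro done c hc hr
    have hc2 : ¬ (0 < size.toNat ∧ size.toNat ≤ (F.drop c.toNat).length) := by
      intro ⟨h1, h2⟩
      have := Nat.div_le_div_right (c := size.toNat) h2
      rw [Nat.div_self h1] at this
      omega
    rw [pvChunks, dif_neg hc2]
    simp
  | succ r ih =>
    intro done c hc hr
    rw [Function.iterate_succ_apply]
    have hk0 : 0 < size.toNat := by omega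
    have hle : size.toNat ≤ (F.drop c.toNat).length := by
      by_contra hlt
      rw [Nat.div_eq_of_lt (by omega)] at hr
      omega
    have hslice : PySem.List.slice F (some c) (some (c + size)) =
        (F.drop c.toNat).take size.toNat := by
      rw [PySem.List.slice_toNat F hc (by omega)]
      congr 1
      omega
    rw [ih (done ++ [PySem.List.slice F (some c) (some (c + size))]) (c + size) (by omega) ?_]
    · have hdd : F.drop (c + size).toNat = (F.drop c.toNat).drop size.toNat := by
        rw [List.drop_drop]
        congr 1
        omega
      rw [hslice, hdd]
      conv_rhs => rw [pvChunks]
      rw [dif_pos ⟨hk0, hle⟩]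
      simp
    · have hdd : F.drop (c + size).toNat = (F.drop c.toNat).drop size.toNat := by
        rw [List.drop_drop]; congr 1; omega
      rw [hdd, List.length_drop]
      rw [Nat.div_eq_sub_div hk0 hle] at hr
      omega

-- rows ≤ 0 when the divisor is negative and the dividend a length
theorem pvRows_neg (n : Nat) (size : Int) (hs : size < 0) :
    PySem.Int.floordiv (n : Int) size ≤ 0 := by
  have hmul := PySem.Int.floordiv_mul_add_mod (n : Int) size
  have hmod := (PySem.Int.mod_neg_bounds (a := (n : Int)) (b := size) hs).2
  set q := PySem.Int.floordiv (n : Int) size with hq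
  by_contra hpos
  rw [not_le] at hpos
  nlinarith [Int.natCast_nonneg n]

-- ===== VERDICT (by name: the statement is the Claim_ definition above) =====
theorem parseBoard_spec : Claim_equal_parseBoard := by
  intro size tiles _ hpre
  have hF : pvFieldsA tiles.toList 0 [] = pvLabels tiles.toList 0 := by
    rw [pvFieldsA_eq]; rfl
  have hAlt := pvAltFold_eq size tiles.toList 0 ([], [])
  conv at hAlt => rw [Nat.cast_zero]
  unfold Spec_parseBoard
  have hA : parseBoard size tiles =
      ((PySem.List.pyRange 0
          (PySem.Int.floordiv ((pvFieldsA tiles.toList 0 []).length : Int) size) 1).foldl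
        (fun (st : List (List String) × Int) _i =>
          (st.1 ++ [PySem.List.slice (pvFieldsA tiles.toList 0 []) (some st.2)
            (some (st.2 + size))], st.2 + size))
        ([], 0)).1 := rfl
  have hB : parseBoard_alt size tiles =
      ((PySem.List.pyRange 0 (tiles.toList.length : Int) 2).foldl
        (fun (st : List (List String) × List String) i =>
          match pvLABELS.get? (PySem.List.slice tiles.toList (some i) (some (i + 2))) with
          | none => st
          | some label =>
            let row := st.2 ++ [label]
            if (row.length : Int) = size then (st.1 ++ [row], []) else (st.1, row))
        ([], [])).1 := rfl
  rw [hA, hB, hF, hAlt]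
  generalize pvLabels tiles.toList 0 = F
  rcases lt_or_gt_of_ne hpre with hneg | hpos
  · -- size < 0: both sides are []
    have hrows := pvRows_neg F.length size hneg
    rw [PySem.List.pyRange_one_eq_nil hrows]
    simp only [List.foldl_nil]
    rw [pvFoldB_neg size hneg]
  · -- size > 0
    rw [pvFoldB_pos size hpos F [] [] (by simp only [List.length_nil]; omega)]
    have hrows : PySem.Int.floordiv (F.length : Int) size
        = ((F.length / size.toNat : Nat) : Int) := by
      rw [PySem.Int.floordiv_eq_ediv_of_pos hpos]
      have hsz : size = (size.toNat : Int) := by omega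
      rw [hsz, ← Int.natCast_ediv]
      simp
    rw [hrows,
      pvFoldl_const (fun (st : List (List String) × Int) =>
        (st.1 ++ [PySem.List.slice F (some st.2) (some (st.2 + size))], st.2 + size)),
      PySem.List.length_pyRange_one]
    have hcount : (((F.length / size.toNat : Nat) : Int) - 0).toNat
        = F.length / size.toNat := by
      generalize F.length / size.toNat = k
      omega
    rw [hcount]
    have hiter := pvIterA size hpos F (F.length / size.toNat) [] 0 le_rfl (by simp)
    simp only [List.drop_zero, Int.toNat_zero] at hiter
    rw [hiter]
    simp
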